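-- pv_equiv track=rewrite | github.com/ufal/flexiconv | flexiconv/io/tbt.py | _word_boundaries
-- ===== SOURCE A (Python) =====
-- from typing import Any, Dict, List, Optional, Tuple
--
-- def _word_boundaries(tx: str) -> List[Tuple[int, int]]:
--     """Return [(start, end), ...] for each word in tx (split on spaces)."""
--     if not tx or not tx.strip():
--         return []
--     spans: List[Tuple[int, int]] = []
--     start = 0
--     for i, c in enumerate(tx):
--         if c == " ":
--             if start < i:
--                 spans.append((start, i))
--             start = i + 1
--     if start < len(tx):
--         spans.append((start, len(tx)))
--     return spans
-- ===== SOURCE B (Python) =====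
-- from typing import List, Tuple
--
-- def _word_boundaries(tx: str) -> List[Tuple[int, int]]:
--     """Return [(start, end), ...] for each word in tx (split on spaces)."""
--     if not tx or not tx.strip():
--         return []
--     spans: List[Tuple[int, int]] = []
--     pos = 0
--     for tok in tx.split(" "):
--         if tok:
--             spans.append((pos, pos + len(tok)))
--         pos += len(tok) + 1
--     return spans
-- ===== Notes on version B (the rewrite author's own statement) =====
-- stated objective: faster
-- what changed: Replaces the char-by-char scan that tracks word starts with a single-space split followed by one offset-accumulating pass over the tokens (the splitting runs in C).
import Mathlib
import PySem

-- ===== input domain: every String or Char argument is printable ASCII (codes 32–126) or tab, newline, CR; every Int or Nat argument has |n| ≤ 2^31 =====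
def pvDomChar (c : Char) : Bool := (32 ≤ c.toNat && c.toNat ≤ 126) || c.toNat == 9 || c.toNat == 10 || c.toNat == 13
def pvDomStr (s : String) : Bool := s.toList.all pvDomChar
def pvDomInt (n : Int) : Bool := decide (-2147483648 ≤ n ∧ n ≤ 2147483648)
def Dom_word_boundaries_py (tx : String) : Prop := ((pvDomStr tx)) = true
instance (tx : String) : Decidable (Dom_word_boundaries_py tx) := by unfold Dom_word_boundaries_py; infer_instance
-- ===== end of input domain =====

-- B replaces A's char-by-char start-tracking scan with a single-space split plus one offset-accumulating pass over tokens; measurably faster (C-level split).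


-- ===== PORT A =====
-- loop body of `for i, c in enumerate(tx): if c == " ": ...` over state (spans, start)
def wbAStep (st : List (Int × Int) × Int) (p : Int × Char) : List (Int × Int) × Int :=
  if p.2 == ' ' then
    ((if st.2 < p.1 then st.1 ++ [(st.2, p.1)] else st.1), p.1 + 1)
  else st

-- trailing `if start < len(tx): spans.append((start, len(tx)))`
def wbAFin (n : Int) (st : List (Int × Int) × Int) : List (Int × Int) :=
  if st.2 < n then st.1 ++ [(st.2, n)] else st.1

def word_boundaries_py (tx : String) : List (Int × Int) :=
  let cs := tx.toList
  if cs.isEmpty || (PySem.Chars.strip cs).isEmpty then []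
  else
    wbAFin (cs.length : Int) ((PySem.List.enumerate cs 0).foldl wbAStep ([], 0))

-- ===== PORT B =====
-- loop body of `for tok in tx.split(" "): ...` over state (spans, pos)
def wbBStep (st : List (Int × Int) × Int) (tok : List Char) : List (Int × Int) × Int :=
  ((if tok.isEmpty then st.1 else st.1 ++ [(st.2, st.2 + (tok.length : Int))]),
   st.2 + (tok.length : Int) + 1)

def word_boundaries_py_alt (tx : String) : List (Int × Int) :=
  let cs := tx.toList
  if cs.isEmpty || (PySem.Chars.strip cs).isEmpty then []
  else
    ((cs.splitOn ' ').foldl wbBStep ([], 0)).1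

-- ===== PRECONDITION & SPEC =====
def Spec_word_boundaries_py (tx : String) (out : List (Int × Int)) : Prop := out = word_boundaries_py_alt tx
instance (tx : String) (out : List (Int × Int)) : Decidable (Spec_word_boundaries_py tx out) := by unfold Spec_word_boundaries_py; infer_instance

-- ===== CLAIM (what is proved, stated in full; the proofs are below) =====
def Claim_equal_word_boundaries_py : Prop := ∀ (tx : String), Dom_word_boundaries_py tx → Spec_word_boundaries_py tx (word_boundaries_py tx)

-- ===== LEMMAS AND PROOFS =====

-- B's token pass with the first token conceptually lengthened by k (the part of the
-- current word A has already scanned past).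
def wbBRun' (ts : List (List Char)) (pos k : Int) (acc : List (Int × Int)) : List (Int × Int) :=
  match ts with
  | [] => acc
  | t :: rest =>
      (rest.foldl wbBStep
        ((if 0 < k + (t.length : Int) then acc ++ [(pos, pos + (k + (t.length : Int)))] else acc),
         pos + (k + (t.length : Int)) + 1)).1

theorem wbBRun'_zero (ts : List (List Char)) (pos : Int) (acc : List (Int × Int)) :
    wbBRun' ts pos 0 acc = (ts.foldl wbBStep (acc, pos)).1 := by
  cases ts with
  | nil => rfl
  | cons t rest =>
      simp only [wbBRun', List.foldl_cons, wbBStep, List.isEmpty_iff, zero_add]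
      by_cases h : t = []
      · subst h; simp
      · simp [h, List.length_pos_iff]

theorem wbCore (cs : List Char) : ∀ (i start : Int) (acc : List (Int × Int)), start ≤ i →
    wbAFin (i + (cs.length : Int)) ((PySem.List.enumerate cs i).foldl wbAStep (acc, start))
      = wbBRun' (cs.splitOnP (· == ' ')) start (i - start) acc := by
  induction cs with
  | nil =>
      intro i start acc h
      simp only [PySem.List.enumerate_nil, List.foldl_nil, List.splitOnP_nil, wbAFin, wbBRun',
        List.length_nil, List.foldl_nil, Nat.cast_zero, add_zero]
      by_cases hlt : start < i
      · have h2 : start + (i - start) = i := by omega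
        rw [if_pos hlt, if_pos (by omega : (0:Int) < i - start), h2]
      · rw [if_neg hlt, if_neg (by omega : ¬ (0:Int) < i - start)]
  | cons c cs ih =>
      intro i start acc h
      rw [PySem.List.enumerate_cons, List.foldl_cons]
      by_cases hc : c = ' '
      · subst hc
        have hstep : wbAStep (acc, start) (i, ' ')
            = ((if start < i then acc ++ [(start, i)] else acc), i + 1) := by
          simp [wbAStep]
        rw [hstep, List.splitOnP_cons]
        simp only [beq_self_eq_true, if_pos]
        have := ih (i + 1) (i + 1) (if start < i then acc ++ [(start, i)] else acc) le_rfl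
        simp only [sub_self] at this ⊢
        have hlen : (i + 1) + ((cs.length : Int)) = i + ((' ' :: cs).length : Int) := by
          simp; ring
        rw [← hlen] at *
        rw [this, wbBRun'_zero]
        -- now both sides are folds over splitOnP cs from matching states
        cases hts : cs.splitOnP (· == ' ') with
        | nil => exact absurd hts (List.splitOnP_ne_nil _ cs)
        | cons t rest =>
            simp only [wbBRun']
            by_cases hlt : start < i
            · have h0 : (0:Int) < i - start := by omega
              have : start + (i - start) = i := by omega
              simp [hlt, this]
            · have h0 : ¬ (0:Int) < i - start := by omega
              have : start + (i - start) = i := by omega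
              simp [hlt, this]
      · have hstep : wbAStep (acc, start) (i, c) = (acc, start) := by
          simp [wbAStep, hc]
        rw [hstep, List.splitOnP_cons]
        have hcb : ((c == ' ') = false) := by simp [hc]
        simp only [hcb, Bool.false_eq_true, if_false]
        have := ih (i + 1) start acc (by omega)
        have hlen : (i + 1) + ((cs.length : Int)) = i + ((c :: cs).length : Int) := by
          simp; ring
        rw [← hlen]
        rw [this]
        cases hts : cs.splitOnP (· == ' ') with
        | nil => exact absurd hts (List.splitOnP_ne_nil _ cs)
        | cons t rest =>
            simp only [List.modifyHead, wbBRun', List.length_cons]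
            have : i + 1 - start + (t.length : Int) = i - start + (((t.length : Nat) + 1 : Nat) : Int) := by
              push_cast; ring
            rw [this]

-- ===== VERDICT (by name: the statement is the Claim_ definition above) =====
theorem word_boundaries_py_spec : Claim_equal_word_boundaries_py := by
  intro tx _
  unfold Spec_word_boundaries_py word_boundaries_py word_boundaries_py_alt
  by_cases hg : tx.toList.isEmpty || (PySem.Chars.strip tx.toList).isEmpty
  · simp [hg]
  · simp only [hg, Bool.false_eq_true, if_false]
    have := wbCore tx.toList 0 0 [] le_rfl
    simp only [zero_add, sub_self] at this
    rw [this, wbBRun'_zero, List.splitOn]
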